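-- pv_equiv track=rewrite | github.com/Kamil-Krynicki/challenges-python | bathroom_stalls.py | do_find
-- ===== SOURCE A (Python) =====
-- from queue import PriorityQueue
--
-- def do_find(N, K):
--     queue = PriorityQueue()
--
--     memo = {N:1}
--     queue.put(-N)
--
--     left, right = 0, 0
--
--     while K > 0:
--         longest = -queue.get()
--         count = memo.pop(longest)
--
--         left = (longest - 1) // 2
--         right = (longest - 1) - left
--
--         if left not in memo.keys():
--             queue.put(-left)
--         memo[left] = memo.setdefault(left, 0) + count
--
--         if right not in memo.keys():
--             queue.put(-right)
--         memo[right] = memo.setdefault(right, 0) + count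
--
--         K -= count
--
--     return max(left ,right), min(left, right)
-- ===== SOURCE B (Python) =====
-- def _insert(segs, s, c):
--     # segs is a list of (size, count) pairs, strictly descending by size;
--     # merge a count c at size s, keeping the order.
--     for i, (t, d) in enumerate(segs):
--         if s > t:
--             return segs[:i] + [(s, c)] + segs[i:]
--         if s == t:
--             return segs[:i] + [(s, d + c)] + segs[i + 1:]
--     return segs + [(s, c)]
--
--
-- def do_find(N, K):
--     # Run-length list of segment sizes kept sorted descending: the next segment
--     # to split is always the head, so no priority queue and no dict are needed.
--     if K <= 0:
--         return 0, 0
--     segs = [(N, 1)]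
--     while True:
--         (s, c), rest = segs[0], segs[1:]
--         half = (s - 1) // 2
--         if K <= c:
--             return s - 1 - half, half
--         K -= c
--         segs = _insert(_insert(rest, half, c), s - 1 - half, c)
-- ===== Notes on version B (the rewrite author's own statement) =====
-- stated objective: alternative
-- what changed: B replaces the PriorityQueue-plus-memo-dict pair by a single run-length list of (size,count) pairs kept sorted in descending order: the next segment to split is always the head, children are merged back by sorted insertion, and the loop early-returns the answer of the deciding segment instead of carrying left/right state to the end.
import Mathlib
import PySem

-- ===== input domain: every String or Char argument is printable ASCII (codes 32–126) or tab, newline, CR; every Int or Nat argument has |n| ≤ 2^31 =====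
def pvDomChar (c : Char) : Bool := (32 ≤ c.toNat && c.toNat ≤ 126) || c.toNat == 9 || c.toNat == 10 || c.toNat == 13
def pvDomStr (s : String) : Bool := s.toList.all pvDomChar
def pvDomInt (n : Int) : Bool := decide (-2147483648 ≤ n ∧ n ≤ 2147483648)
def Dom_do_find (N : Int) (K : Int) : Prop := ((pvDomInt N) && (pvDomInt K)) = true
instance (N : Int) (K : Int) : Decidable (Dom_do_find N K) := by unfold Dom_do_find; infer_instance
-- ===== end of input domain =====

-- B replaces A's PriorityQueue+memo-dict pair by a single run-length list of (size, count)
-- pairs kept sorted in descending size order: the next segment is always the head, children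
-- are merged back by sorted insertion, and the loop early-returns from the deciding segment
-- (objective: alternative). Both ports run on fuel = K.toNat, a totality guard only.

-- ===== PORT A =====
-- One pass of A's while-body acting on (queue, memo); returns (queue', memo', left, right, count).
-- The queue holds the negated sizes; PriorityQueue.get = pop the minimum (on an empty queue
-- Python would block forever; that state is unreachable, the port then removes nothing).
def aStep (q : List Int) (memo : PySem.Dict Int Int) :
    List Int × PySem.Dict Int Int × Int × Int × Int :=
  let negLongest := (PySem.List.min? q (fun x => x)).getD 0
  let longest := -negLongest
  let q := (PySem.List.remove? q negLongest).getD q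
  -- count = memo.pop(longest): the key is always present (queue items mirror memo keys)
  let pc := (memo.pop? longest).getD (0, memo)
  let count := pc.1
  let memo := pc.2
  let left := PySem.Int.floordiv (longest - 1) 2
  let right := (longest - 1) - left
  let q := if memo.contains left then q else q ++ [-left]
  let memo := memo.setdefault left 0
  let memo := memo.insert left (memo.getD left 0 + count)
  let q := if memo.contains right then q else q ++ [-right]
  let memo := memo.setdefault right 0
  let memo := memo.insert right (memo.getD right 0 + count)
  (q, memo, left, right, count)

def do_find_loop : Nat → List Int → PySem.Dict Int Int → Int → Int → Int → Int × Int
  | 0, _, _, left, right, _ => (max left right, min left right)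
  | fuel+1, q, memo, left, right, K =>
    if K > 0 then
      let s := aStep q memo
      do_find_loop fuel s.1 s.2.1 s.2.2.1 s.2.2.2.1 (K - s.2.2.2.2)
    else (max left right, min left right)

def do_find (N : Int) (K : Int) : Int × Int :=
  do_find_loop K.toNat [-N] (PySem.Dict.ofList [(N, 1)]) 0 0 K

-- ===== PORT B =====
-- Source B's _insert: merge count c at size s into a strictly descending run-length list.
def bInsert : List (Int × Int) → Int → Int → List (Int × Int)
  | [], s, c => [(s, c)]
  | (t, d) :: rest, s, c =>
    if s > t then (s, c) :: (t, d) :: rest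
    else if s = t then (s, d + c) :: rest
    else (t, d) :: bInsert rest s c

def do_find_alt_loop : Nat → List (Int × Int) → Int → Int × Int
  | 0, _, _ => (0, 0)          -- fuel guard only, never reached
  | fuel+1, segs, K =>
    match segs with
    | [] => (0, 0)             -- unreachable: the list never empties
    | (s, c) :: rest =>
      let half := PySem.Int.floordiv (s - 1) 2
      if K ≤ c then (s - 1 - half, half)
      else do_find_alt_loop fuel (bInsert (bInsert rest half c) (s - 1 - half) c) (K - c)

def do_find_alt (N : Int) (K : Int) : Int × Int :=
  if K ≤ 0 then (0, 0) else do_find_alt_loop K.toNat [(N, 1)] K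

-- ===== PRECONDITION & SPEC =====
def Spec_do_find (N : Int) (K : Int) (out : Int × Int) : Prop := out = do_find_alt N K
instance (N : Int) (K : Int) (out : Int × Int) : Decidable (Spec_do_find N K out) := by unfold Spec_do_find; infer_instance

-- ===== CLAIM (what is proved, stated in full; the proofs are below) =====
def Claim_equal_do_find : Prop := ∀ (N : Int) (K : Int), Dom_do_find N K → Spec_do_find N K (do_find N K)

-- ===== LEMMAS AND PROOFS =====

-- strictly descending by size
def SortedD (segs : List (Int × Int)) : Prop := segs.Pairwise (fun p q => q.1 < p.1)

-- queue ~ negated memo keys, distinct keys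
def QInv (q : List Int) (memo : PySem.Dict Int Int) : Prop :=
  q.Perm (memo.keys.map (fun k => -k)) ∧ memo.keys.Nodup

-- full invariant between A's (queue, memo) and B's sorted run-length list
def LInv (q : List Int) (memo : PySem.Dict Int Int) (segs : List (Int × Int)) : Prop :=
  q.Perm (memo.keys.map (fun k => -k)) ∧ memo.items.Perm segs ∧ SortedD segs ∧
    (∀ p ∈ segs, 1 ≤ p.2) ∧ segs ≠ []

lemma keys_perm_of_items_perm (memo : PySem.Dict Int Int) (segs : List (Int × Int))
    (h : memo.items.Perm segs) : memo.keys.Perm (segs.map Prod.fst) := by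
  simpa [PySem.Dict.keys] using h.map Prod.fst

lemma keys_nodup_of (memo : PySem.Dict Int Int) (segs : List (Int × Int))
    (h : memo.items.Perm segs) (hs : SortedD segs) : memo.keys.Nodup := by
  have hnd : (segs.map Prod.fst).Nodup := by
    exact List.pairwise_map.mpr (hs.imp (fun h => by omega))
  exact ((keys_perm_of_items_perm memo segs h).nodup_iff).mpr hnd

-- The minimum of the queue is the negated maximum of the memo keys.
lemma longest_eq (q m : List Int) (h : q.Perm (m.map (fun k => -k))) :
    (PySem.List.min? q (fun x => x)).getD 0 = -((PySem.List.max? m (fun x => x)).getD 0) := by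
  rcases hm : PySem.List.max? m (fun x => x) with _ | w
  · have hm' : m = [] := (PySem.List.max?_eq_none_iff m _).mp hm
    subst hm'
    have hq : q = [] := by simpa using h
    subst hq
    simp [PySem.List.min?]
  · rcases hq : PySem.List.min? q (fun x => x) with _ | v
    · exfalso
      have hq' : q = [] := (PySem.List.min?_eq_none_iff q _).mp hq
      subst hq'
      have hm0 : m = [] := by simpa using h.symm
      subst hm0
      simp [PySem.List.max?] at hm
    · have hvq : v ∈ q := PySem.List.min?_mem hq
      have hwm : w ∈ m := PySem.List.max?_mem hm
      have hvm : v ∈ m.map (fun k => -k) := h.mem_iff.mp hvq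
      obtain ⟨k, hk, hkv⟩ := List.mem_map.mp hvm
      have h1 : (fun x => x) k ≤ (fun x => x) w := PySem.List.max?_isMax hm k hk
      have h2 : (fun x => x) v ≤ (fun x => x) (-w) :=
        PySem.List.min?_isMin hq (-w) (h.mem_iff.mpr (List.mem_map.mpr ⟨w, hwm, rfl⟩))
      simp only at h1 h2 hkv
      simp only [Option.getD_some]
      omega

-- the head of the sorted run-length list is the memo's maximum key
lemma head_max (memo : PySem.Dict Int Int) (s c : Int) (rest : List (Int × Int))
    (hp : memo.items.Perm ((s, c) :: rest)) (hs : SortedD ((s, c) :: rest)) :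
    (PySem.List.max? memo.keys (fun x => x)).getD 0 = s := by
  have hkp : memo.keys.Perm (s :: rest.map Prod.fst) := keys_perm_of_items_perm _ _ hp
  have hsk : s ∈ memo.keys := hkp.mem_iff.mpr List.mem_cons_self
  rcases hm : PySem.List.max? memo.keys (fun x => x) with _ | w
  · exact absurd ((PySem.List.max?_eq_none_iff _ _).mp hm ▸ hsk) (List.not_mem_nil)
  · have hwk : w ∈ memo.keys := PySem.List.max?_mem hm
    have hle : s ≤ w := PySem.List.max?_isMax hm s hsk
    have hw' : w ∈ s :: rest.map Prod.fst := hkp.mem_iff.mp hwk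
    rcases List.mem_cons.mp hw' with h | h
    · simp [h]
    · obtain ⟨p, hp', hps⟩ := List.mem_map.mp h
      have := (List.pairwise_cons.mp hs).1 p hp'
      simp only [Option.getD_some]
      omega

-- setdefault-then-overwrite is a single insert
lemma setdefault_insert_eq (d : PySem.Dict Int Int) (k c : Int) :
    ((d.setdefault k 0).insert k ((d.setdefault k 0).getD k 0 + c))
      = d.insert k (d.getD k 0 + c) := by
  by_cases hc : d.contains k = true
  · rw [PySem.Dict.setdefault_of_contains d 0 hc]
  · have hc' : d.contains k = false := by simpa using hc
    rw [PySem.Dict.setdefault_of_not_contains d 0 hc', PySem.Dict.getD_insert_self,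
      PySem.Dict.insert_insert_self, PySem.Dict.getD_of_not_contains d 0 hc']

lemma keys_erase_of_nodup (d : PySem.Dict Int Int) (k : Int) (hnd : d.keys.Nodup) :
    (d.erase k).keys = d.keys.erase k := by
  rw [hnd.erase_eq_filter k]
  simp only [PySem.Dict.erase, PySem.Dict.keys, List.filter_map]
  congr 1

-- one queue push step preserves the permutation invariant
lemma queue_insert_perm (q : List Int) (d : PySem.Dict Int Int) (k v : Int)
    (h : q.Perm (d.keys.map (fun j => -j))) :
    (if d.contains k then q else q ++ [-k]).Perm ((d.insert k v).keys.map (fun j => -j)) := by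
  by_cases hc : d.contains k = true
  · rw [if_pos hc, PySem.Dict.keys_insert_of_contains d v hc]
    exact h
  · have hc' : d.contains k = false := by simpa using hc
    rw [if_neg (by simp [hc']), PySem.Dict.keys_insert_of_not_contains d v hc']
    simpa [List.map_append] using h.append (List.Perm.refl [-k])

-- popping the maximum key keeps queue and memo in sync
lemma pop_sync (q : List Int) (d : PySem.Dict Int Int) (hinv : QInv q d) :
    QInv ((PySem.List.remove? q (-((PySem.List.max? d.keys (fun x => x)).getD 0))).getD q)
         (((d.pop? ((PySem.List.max? d.keys (fun x => x)).getD 0)).getD (0, d)).2) := by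
  obtain ⟨hp, hnd⟩ := hinv
  rcases hm : PySem.List.max? d.keys (fun x => x) with _ | w
  · have hK : d.keys = [] := (PySem.List.max?_eq_none_iff _ _).mp hm
    have hd : d.items = [] := by
      cases d with
      | mk l =>
        cases l with
        | nil => rfl
        | cons a t => simp [PySem.Dict.keys] at hK
    have hq : q = [] := by rw [hK] at hp; simpa using hp
    refine ⟨?_, ?_⟩ <;>
      simp [hq, PySem.List.remove?, PySem.Dict.pop?, PySem.Dict.get?, PySem.Dict.keys, hd]
  · have hwm : w ∈ d.keys := PySem.List.max?_mem hm
    have hcont : d.contains w = true := (PySem.Dict.contains_iff_mem_keys d w).mpr hwm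
    obtain ⟨v, hv⟩ : ∃ v, d.get? w = some v := by
      rw [PySem.Dict.contains_eq_isSome_get?] at hcont
      exact Option.isSome_iff_exists.mp hcont
    have hmem : -w ∈ q := hp.mem_iff.mpr (List.mem_map.mpr ⟨w, hwm, rfl⟩)
    simp only [Option.getD_some, PySem.Dict.pop?, hv, Option.map_some,
      PySem.List.remove?_eq_some_erase q (-w) hmem]
    refine ⟨?_, ?_⟩
    · rw [keys_erase_of_nodup d w hnd]
      have hperm := hp.erase (-w)
      rw [← List.map_erase neg_injective] at hperm
      exact hperm
    · rw [keys_erase_of_nodup d w hnd]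
      exact hnd.erase w

-- pushing the two children into queue and memo preserves the queue invariant
lemma two_push (q : List Int) (M : PySem.Dict Int Int) (lf rt vL c : Int)
    (hp2 : q.Perm (M.keys.map (fun j => -j))) (hnd2 : M.keys.Nodup) :
    QInv (if (M.insert lf vL).contains rt then (if M.contains lf then q else q ++ [-lf])
          else (if M.contains lf then q else q ++ [-lf]) ++ [-rt])
         ((M.insert lf vL).insert rt ((M.insert lf vL).getD rt 0 + c)) := by
  have s1 := queue_insert_perm q M lf vL hp2
  have s2 := queue_insert_perm _ _ rt ((M.insert lf vL).getD rt 0 + c) s1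
  exact ⟨s2, PySem.Dict.nodup_keys_insert _ _ _ (PySem.Dict.nodup_keys_insert _ _ _ hnd2)⟩

-- membership after a sorted insertion
lemma bInsert_mem (segs : List (Int × Int)) (k c : Int) :
    ∀ p ∈ bInsert segs k c, p.1 = k ∨ p ∈ segs := by
  induction segs with
  | nil => intro p hp; simp [bInsert] at hp; simp [hp]
  | cons hd tl ih =>
    obtain ⟨t, d⟩ := hd
    intro p hp
    simp only [bInsert] at hp
    split_ifs at hp with h1 h2
    · rcases List.mem_cons.mp hp with h | h
      · simp [h]
      · right; exact h
    · rcases List.mem_cons.mp hp with h | h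
      · simp [h]
      · right; exact List.mem_cons_of_mem _ h
    · rcases List.mem_cons.mp hp with h | h
      · right; simp [h]
      · rcases ih p h with h' | h'
        · left; exact h'
        · right; exact List.mem_cons_of_mem _ h'

-- sorted insertion keeps the list strictly descending
lemma bInsert_sorted (segs : List (Int × Int)) (k c : Int) (hs : SortedD segs) :
    SortedD (bInsert segs k c) := by
  induction segs with
  | nil => simp [bInsert, SortedD]
  | cons hd tl ih =>
    obtain ⟨t, d⟩ := hd
    rcases List.pairwise_cons.mp hs with ⟨hhd, htl⟩
    simp only [bInsert]
    split_ifs with h1 h2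
    · refine List.pairwise_cons.mpr ⟨?_, hs⟩
      intro p hp
      rcases List.mem_cons.mp hp with h | h
      · simp [h]; omega
      · have := hhd p h; simp at this ⊢; omega
    · subst h2
      exact List.pairwise_cons.mpr ⟨fun p hp => by have := hhd p hp; simpa using this, htl⟩
    · refine List.pairwise_cons.mpr ⟨?_, ih htl⟩
      intro p hp
      rcases bInsert_mem tl k c p hp with h | h
      · simp [h]; omega
      · exact hhd p h

-- sorted insertion keeps counts positive
lemma bInsert_pos (segs : List (Int × Int)) (k c : Int)
    (h : ∀ p ∈ segs, 1 ≤ p.2) (hc : 1 ≤ c) : ∀ p ∈ bInsert segs k c, 1 ≤ p.2 := by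
  induction segs with
  | nil => intro p hp; simp [bInsert] at hp; simp [hp]; omega
  | cons hd tl ih =>
    obtain ⟨t, d⟩ := hd
    intro p hp
    simp only [bInsert] at hp
    have hd1 : (1:Int) ≤ d := h (t, d) (List.mem_cons_self)
    have htl : ∀ p ∈ tl, (1:Int) ≤ p.2 := fun p hp => h p (List.mem_cons_of_mem _ hp)
    split_ifs at hp with h1 h2
    · rcases List.mem_cons.mp hp with h' | h'
      · simp [h']; omega
      · exact h p h'
    · rcases List.mem_cons.mp hp with h' | h'
      · simp [h']; omega
      · exact htl p h'
    · rcases List.mem_cons.mp hp with h' | h'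
      · simp [h']; omega
      · exact ih htl p h'

-- fresh key: sorted insertion is a permutation of appending
lemma bInsert_perm_append (segs : List (Int × Int)) (k c : Int)
    (hk : k ∉ segs.map Prod.fst) : (bInsert segs k c).Perm (segs ++ [(k, c)]) := by
  induction segs with
  | nil => simp [bInsert]
  | cons hd tl ih =>
    obtain ⟨t, d⟩ := hd
    have hkt : k ≠ t := by simp at hk; exact fun h => (hk.1 h).elim
    have hk' : k ∉ tl.map Prod.fst := by simp at hk ⊢; exact hk.2
    simp only [bInsert]
    split_ifs with h1
    · exact List.Perm.symm (List.perm_append_comm.trans (by simp))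
    · simpa using (ih hk').cons (t, d)

-- present key: sorted insertion is the value-replacing map
lemma bInsert_eq_map (segs : List (Int × Int)) (k d c : Int) (hs : SortedD segs)
    (hm : (k, d) ∈ segs) :
    bInsert segs k c = segs.map (fun p => if (p.1 == k) = true then (k, d + c) else p) := by
  induction segs with
  | nil => simp at hm
  | cons hd tl ih =>
    obtain ⟨t, e⟩ := hd
    rcases List.pairwise_cons.mp hs with ⟨hhd, htl⟩
    rcases List.mem_cons.mp hm with h | h
    · obtain ⟨h1, h2⟩ := Prod.mk.injEq .. ▸ h
      subst h1; subst h2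
      simp only [bInsert, if_neg (lt_irrefl k), List.map_cons]
      have : ∀ p ∈ tl, ¬ ((p.1 == k) = true) := by
        intro p hp hb
        have := hhd p hp
        have : p.1 = k := by simpa using hb
        omega
      rw [show (if ((k:Int) == k) = true then (k, d + c) else (k, d)) = (k, d + c) by simp]
      rw [List.map_congr_left (fun p hp => if_neg (this p hp))]
      simp
    · have hkt : k < t := by have := hhd (k, d) h; simpa using this
      simp only [bInsert, if_neg (by omega : ¬ k > t), if_neg (by omega : ¬ k = t)]
      rw [List.map_cons, ih htl h]
      congr 1
      simp [show ¬ (t = k) by omega]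

-- A's memo insert corresponds to B's sorted insertion
lemma insert_bInsert (M : PySem.Dict Int Int) (segs : List (Int × Int)) (k c : Int)
    (hperm : M.items.Perm segs) (hs : SortedD segs) :
    (M.insert k (M.getD k 0 + c)).items.Perm (bInsert segs k c) := by
  have hnd : M.keys.Nodup := keys_nodup_of M segs hperm hs
  by_cases hc : M.contains k = true
  · obtain ⟨d, hd⟩ : ∃ d, M.get? k = some d := by
      rw [PySem.Dict.contains_eq_isSome_get?] at hc
      exact Option.isSome_iff_exists.mp hc
    have hmem : (k, d) ∈ segs := hperm.mem_iff.mp (PySem.Dict.mem_items_of_get?_eq_some M hd)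
    have hgD : M.getD k 0 = d := by
      simp [PySem.Dict.getD_eq_get?_getD, hd]
    rw [PySem.Dict.items_insert_of_contains M _ hc, hgD,
      bInsert_eq_map segs k d c hs hmem]
    exact hperm.map _
  · have hc' : M.contains k = false := by simpa using hc
    have hk : k ∉ segs.map Prod.fst := by
      intro hmem
      have : k ∈ M.keys := ((keys_perm_of_items_perm M segs hperm).mem_iff).mpr hmem
      exact absurd ((PySem.Dict.contains_iff_mem_keys M k).mpr this) (by simp [hc'])
    rw [PySem.Dict.items_insert_of_not_contains M _ hc',
      PySem.Dict.getD_of_not_contains M 0 hc']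
    refine (hperm.append (List.Perm.refl [(k, 0 + c)])).trans ?_
    have := bInsert_perm_append segs k c hk
    rw [show (0:Int) + c = c by ring]
    exact this.symm

-- erasing the head key of the run-length list
lemma erase_perm (M : PySem.Dict Int Int) (s c : Int) (rest : List (Int × Int))
    (hperm : M.items.Perm ((s, c) :: rest)) (hs : SortedD ((s, c) :: rest)) :
    (M.erase s).items.Perm rest := by
  have hrest : ∀ p ∈ rest, ¬ ((p.1 == s) = true) := by
    intro p hp hb
    have h1 := (List.pairwise_cons.mp hs).1 p hp
    have : p.1 = s := by simpa using hb
    omega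
  have heq : (M.erase s).items = M.items.filter (fun p => !(p.1 == s)) := rfl
  have h2 : List.filter (fun p => !(p.1 == s)) ((s, c) :: rest) = rest := by
    rw [List.filter_cons, if_neg (by simp)]
    exact List.filter_eq_self.mpr (fun p hp => by
      have := hrest p hp
      simp only [Bool.not_eq_true'] at this ⊢
      simpa using this)
  rw [heq]
  exact h2 ▸ hperm.filter (fun p => !(p.1 == s))

-- the run-length list never empties
lemma bInsert_ne_nil (segs : List (Int × Int)) (k c : Int) : bInsert segs k c ≠ [] := by
  cases segs with
  | nil => simp [bInsert]
  | cons hd tl =>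
    obtain ⟨t, d⟩ := hd
    simp only [bInsert]
    split_ifs <;> simp

-- floor division by two: the right child is at least the left one
lemma fdiv2_le (a : Int) : PySem.Int.floordiv a 2 ≤ a - PySem.Int.floordiv a 2 := by
  have h : Int.fdiv a 2 = a / 2 := by
    rw [Int.fdiv_eq_ediv]
    simp
  simp only [PySem.Int.floordiv, h]
  omega

-- A's one pass, written out with the pop and the setdefaults resolved
lemma aStep_eq (q : List Int) (memo : PySem.Dict Int Int) (s c : Int)
    (hlon : (PySem.List.min? q (fun x => x)).getD 0 = -s)
    (hget : memo.get? s = some c) :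
    aStep q memo =
      (let E := memo.erase s
       let l' := PySem.Int.floordiv (s - 1) 2
       let r' := (s - 1) - l'
       let q1 := (PySem.List.remove? q (-s)).getD q
       let M1 := E.insert l' (E.getD l' 0 + c)
       let q2 := if E.contains l' then q1 else q1 ++ [-l']
       let M2 := M1.insert r' (M1.getD r' 0 + c)
       let q3 := if M1.contains r' then q2 else q2 ++ [-r']
       (q3, M2, l', r', c)) := by
  unfold aStep
  simp only [hlon, neg_neg, PySem.Dict.pop?, hget, Option.map_some, Option.getD_some]
  rw [setdefault_insert_eq, setdefault_insert_eq]

-- once K is exhausted A's loop returns its carried pair for any fuel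
lemma loop_nonpos (fuel : Nat) (q : List Int) (memo : PySem.Dict Int Int)
    (l r K : Int) (hK : ¬ K > 0) :
    do_find_loop fuel q memo l r K = (max l r, min l r) := by
  cases fuel with
  | zero => rfl
  | succ n => simp [do_find_loop, hK]

-- the lockstep lemma
lemma loop_eq (fuel : Nat) : ∀ (q : List Int) (memo : PySem.Dict Int Int)
    (segs : List (Int × Int)) (l r K : Int),
    LInv q memo segs → 0 < K → K ≤ (fuel : Int) →
    do_find_loop fuel q memo l r K = do_find_alt_loop fuel segs K := by
  induction fuel with
  | zero =>
    intro q memo segs l r K _ hK hle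
    exfalso
    simp at hle
    omega
  | succ n ih =>
    intro q memo segs l r K hinv hK hle
    obtain ⟨hq, hitems, hsort, hpos, hne⟩ := hinv
    cases segs with
    | nil => exact absurd rfl hne
    | cons p rest =>
    obtain ⟨s, c⟩ := p
    have hnd : memo.keys.Nodup := keys_nodup_of memo _ hitems hsort
    have hmax : (PySem.List.max? memo.keys (fun x => x)).getD 0 = s :=
      head_max memo s c rest hitems hsort
    have hget : memo.get? s = some c :=
      PySem.Dict.get?_of_mem_items memo (hitems.mem_iff.mpr List.mem_cons_self) hnd
    have hlon : (PySem.List.min? q (fun x => x)).getD 0 = -s := by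
      rw [longest_eq q memo.keys hq, hmax]
    have hc1 : (1:Int) ≤ c := hpos (s, c) List.mem_cons_self
    have hrsort : SortedD rest := (List.pairwise_cons.mp hsort).2
    -- abbreviations for the post-step state
    set E := memo.erase s with hE
    set l' := PySem.Int.floordiv (s - 1) 2 with hl'
    set r' := (s - 1) - l' with hr'
    set q1 := (PySem.List.remove? q (-s)).getD q with hq1
    set M1 := E.insert l' (E.getD l' 0 + c) with hM1
    set q2 := if E.contains l' then q1 else q1 ++ [-l'] with hq2
    set M2 := M1.insert r' (M1.getD r' 0 + c) with hM2
    set q3 := if M1.contains r' then q2 else q2 ++ [-r'] with hq3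
    have hstep := aStep_eq q memo s c hlon hget
    simp only [] at hstep
    have hll : l' ≤ r' := by
      have := fdiv2_le (s - 1)
      omega
    -- the queue invariant after the pass
    have hpopq : QInv q1 E := by
      have := pop_sync q memo ⟨hq, hnd⟩
      rw [hmax] at this
      simpa [PySem.Dict.pop?, hget] using this
    have hpush := two_push q1 E l' r' (E.getD l' 0 + c) c hpopq.1
      (keys_nodup_of E rest (erase_perm memo s c rest hitems hsort) hrsort)
    -- the run-length list after the pass
    have hp1 : M1.items.Perm (bInsert rest l' c) :=
      insert_bInsert E rest l' c (erase_perm memo s c rest hitems hsort) hrsort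
    have hs1 : SortedD (bInsert rest l' c) := bInsert_sorted rest l' c hrsort
    have hp2 : M2.items.Perm (bInsert (bInsert rest l' c) r' c) :=
      insert_bInsert M1 (bInsert rest l' c) r' c hp1 hs1
    -- unfold one pass of each loop
    simp only [do_find_loop, if_pos hK, hstep]
    simp only [do_find_alt_loop]
    by_cases hKc : K ≤ c
    · rw [if_pos hKc]
      have : K - c ≤ 0 := by omega
      rw [loop_nonpos n _ _ _ _ _ (by omega)]
      rw [max_eq_right hll, min_eq_left hll]
    · rw [if_neg hKc]
      apply ih
      · exact ⟨hpush.1, hp2, bInsert_sorted _ r' c hs1,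
          bInsert_pos _ r' c (bInsert_pos rest l' c
            (fun p hp => hpos p (List.mem_cons_of_mem _ hp)) hc1) hc1,
          bInsert_ne_nil _ r' c⟩
      · omega
      · have : K ≤ (n:Int) + 1 := by push_cast at hle ⊢; omega
        omega

-- ===== VERDICT (by name: the statement is the Claim_ definition above) =====
theorem do_find_spec : Claim_equal_do_find := by
  intro N K _
  unfold Spec_do_find do_find do_find_alt
  by_cases hK : K ≤ 0
  · have : K.toNat = 0 := by omega
    simp [this, do_find_loop, hK]
  · rw [if_neg hK]
    apply loop_eq
    · refine ⟨?_, ?_, ?_, ?_, ?_⟩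
      · simp [PySem.Dict.ofList, PySem.Dict.keys, PySem.Dict.update, PySem.Dict.insert,
          PySem.Dict.empty, PySem.Dict.contains]
      · simp [PySem.Dict.ofList, PySem.Dict.update, PySem.Dict.insert,
          PySem.Dict.empty, PySem.Dict.contains]
      · simp [SortedD]
      · intro p hp; simp at hp; simp [hp]
      · simp
    · omega
    · omega
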